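-- pv_equiv track=rewrite | github.com/poleha/py_examples | learn/sporting/slice_game.py | _solution
-- ===== SOURCE A (Python) =====
-- def iterate_array(a):
--     l = len(a)
--     for j in range(l): # Первый символ
--         for i in range(1, l + 1- j): # Длина
--             cur = a[j:j + i]
--             if sum(cur) % 2 == 1:
--                 continue
--             left = a[:j] + a[j + i:]
--             if left and sum(left) % 2 == 0:
--                 continue
--             yield (left, i, j)
--
-- def _solution(a):
--     for left, i, j in iterate_array(a):
--         if not left:
--             return (0, len(a) - 1)
--         l = len(left)
--         if l == 1:
--             return (j, j + i - 1)
--         if l == 2: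
--             continue
--         odd_count = 0
--         left_even_count = 0
--         right_even_count = 0
--         odd_index = None
--         for s in left:
--             if s % 2 == 1:
--                 odd_count += 1
--                 odd_index = j
--             else:
--                 if odd_index is None:
--                     left_even_count += 1
--                 else:
--                     right_even_count += 1
--             if odd_count == 2:
--                 break
--         if odd_count == 1 and left_even_count == right_even_count:
--             return (j, j + i - 1)
-- ===== SOURCE B (Python) =====
-- def _solution(a):
--     l = len(a)
--     # one pass: total odd count, first and last odd index (-1 sentinels)
--     total = 0
--     first_odd = -1
--     last_odd = -1
--     for k, s in enumerate(a):
--         if s % 2 != 0: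
--             total += 1
--             if first_odd < 0:
--                 first_odd = k
--             last_odd = k
--     oj = 0  # number of odd elements in a[:j]
--     for j in range(l):
--         so = 0  # number of odd elements in a[j:j+i]
--         for i in range(1, l + 1 - j):
--             if a[j + i - 1] % 2 != 0:
--                 so += 1
--             if so % 2 == 1:          # slice sum odd
--                 continue
--             llen = l - i             # len(left)
--             lodd = total - so        # odd count of left (= parity of sum(left))
--             if llen > 0 and lodd % 2 == 0:
--                 continue
--             if llen == 0:
--                 return (0, l - 1)
--             if llen == 1:
--                 return (j, j + i - 1)
--             if llen == 2:
--                 continue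
--             if lodd == 1:
--                 p = first_odd if oj == 1 else last_odd - i
--                 if 2 * p == llen - 1:
--                     return (j, j + i - 1)
--         if a[j] % 2 != 0:
--             oj += 1
--     return None
-- ===== Notes on version B (the rewrite author's own statement) =====
-- stated objective: faster
-- what changed: Replaces per-slice sum/scan work (materialising each slice, summing it, summing the remainder and scanning it) by running odd-counters: parity of any sum equals parity of its odd count, so one precomputed pass (total odd count, first/last odd index) plus incrementally maintained counters decide every (start,length) candidate in O(1).
import Mathlib
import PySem

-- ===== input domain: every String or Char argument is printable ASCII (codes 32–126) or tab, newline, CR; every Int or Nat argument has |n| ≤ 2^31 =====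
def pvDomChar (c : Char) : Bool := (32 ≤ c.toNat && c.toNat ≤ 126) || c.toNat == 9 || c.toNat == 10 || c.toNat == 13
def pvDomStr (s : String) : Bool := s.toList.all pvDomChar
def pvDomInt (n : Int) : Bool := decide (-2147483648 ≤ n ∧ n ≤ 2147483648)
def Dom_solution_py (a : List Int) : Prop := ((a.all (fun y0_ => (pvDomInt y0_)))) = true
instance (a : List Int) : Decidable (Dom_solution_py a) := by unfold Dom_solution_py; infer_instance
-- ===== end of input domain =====

-- B replaces A's per-candidate O(n) work (materialising each slice, summing slice and remainder,
-- scanning the remainder) by odd-element counters maintained incrementally, O(n^2) instead of O(n^3).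

-- ===== PORT A =====
-- A's inner scan over `left` (odd_index is only ever compared with None, so it is ported as the
-- Boolean `seen`; the `break` returns the value of the post-loop test with the current state).
def aScan : List Int → Int → Int → Int → Bool → Bool
  | [], oc, lec, rec, _ => oc == 1 && lec == rec
  | s :: rest, oc, lec, rec, seen =>
    if PySem.Int.mod s 2 == 1 then
      let oc' := oc + 1
      if oc' == 2 then (oc' == 1 && lec == rec) else aScan rest oc' lec rec true
    else
      if seen then
        (if oc == 2 then (oc == 1 && lec == rec) else aScan rest oc lec (rec + 1) seen)
      else
        (if oc == 2 then (oc == 1 && lec == rec) else aScan rest oc (lec + 1) rec seen)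

-- the generator `iterate_array` is fused with its only consumer `_solution`: each candidate (j,i)
-- that passes the yield conditions is processed immediately (return = some, continue = next i).
-- a[j:j+i] = (a.drop j).take i and a[:j]+a[j+i:] = a.take j ++ a.drop (j+i) for these Nat args (exact).
def aLoopI (a : List Int) (j i : Nat) : Option (Int × Int) :=
  if h : i ≤ a.length - j then
    let cur := (a.drop j).take i
    if PySem.Int.mod cur.sum 2 == 1 then aLoopI a j (i + 1)
    else
      let left := a.take j ++ a.drop (j + i)
      if !left.isEmpty && (PySem.Int.mod left.sum 2 == 0) then aLoopI a j (i + 1)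
      else
        if left.isEmpty then some (0, (a.length : Int) - 1)
        else if left.length == 1 then some ((j : Int), (j : Int) + (i : Int) - 1)
        else if left.length == 2 then aLoopI a j (i + 1)
        else if aScan left 0 0 0 false then some ((j : Int), (j : Int) + (i : Int) - 1)
        else aLoopI a j (i + 1)
  else none
termination_by a.length - j + 1 - i
decreasing_by all_goals omega

def aLoopJ (a : List Int) (j : Nat) : Option (Int × Int) :=
  if _h : j < a.length then
    match aLoopI a j 1 with
    | some r => some r
    | none => aLoopJ a (j + 1)
  else none
termination_by a.length - j

def solution_py (a : List Int) : Option (Int × Int) := aLoopJ a 0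

-- ===== PORT B =====
-- the `for k, s in enumerate(a)` statistics pass of Source B
def bStats : List Int → Nat → Int × Int × Int → Int × Int × Int
  | [], _, st => st
  | s :: rest, k, (total, fo, lo) =>
    if PySem.Int.mod s 2 != 0 then
      bStats rest (k + 1) (total + 1, if fo < 0 then (k : Int) else fo, (k : Int))
    else bStats rest (k + 1) (total, fo, lo)

-- inner `for i in range(1, l + 1 - j)` loop; a[j+i-1] is in range inside the loop, so getD is exact
def bLoopI (a : List Int) (total fo lo oj : Int) (j i : Nat) (so : Int) : Option (Int × Int) :=
  if h : i ≤ a.length - j then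
    let so := if PySem.Int.mod (a.getD (j + i - 1) 0) 2 != 0 then so + 1 else so
    if PySem.Int.mod so 2 == 1 then bLoopI a total fo lo oj j (i + 1) so
    else
      let llen : Int := (a.length : Int) - (i : Int)
      let lodd : Int := total - so
      if llen > 0 && (PySem.Int.mod lodd 2 == 0) then bLoopI a total fo lo oj j (i + 1) so
      else if llen == 0 then some (0, (a.length : Int) - 1)
      else if llen == 1 then some ((j : Int), (j : Int) + (i : Int) - 1)
      else if llen == 2 then bLoopI a total fo lo oj j (i + 1) so
      else if lodd == 1 then
        let p : Int := if oj == 1 then fo else lo - (i : Int)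
        if 2 * p == llen - 1 then some ((j : Int), (j : Int) + (i : Int) - 1)
        else bLoopI a total fo lo oj j (i + 1) so
      else bLoopI a total fo lo oj j (i + 1) so
  else none
termination_by a.length - j + 1 - i
decreasing_by all_goals omega

-- outer `for j in range(l)` loop; a[j] is in range, so getD is exact
def bLoopJ (a : List Int) (total fo lo : Int) (j : Nat) (oj : Int) : Option (Int × Int) :=
  if _h : j < a.length then
    match bLoopI a total fo lo oj j 1 0 with
    | some r => some r
    | none =>
        bLoopJ a total fo lo (j + 1)
          (if PySem.Int.mod (a.getD j 0) 2 != 0 then oj + 1 else oj)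
  else none
termination_by a.length - j

def solution_py_alt (a : List Int) : Option (Int × Int) :=
  match bStats a 0 (0, -1, -1) with
  | (total, fo, lo) => bLoopJ a total fo lo 0 0

-- ===== PRECONDITION & SPEC =====
def Spec_solution_py (a : List Int) (out : Option (Int × Int)) : Prop := out = solution_py_alt a
instance (a : List Int) (out : Option (Int × Int)) : Decidable (Spec_solution_py a out) := by unfold Spec_solution_py; infer_instance

-- ===== CLAIM (what is proved, stated in full; the proofs are below) =====
def Claim_equal_solution_py : Prop := ∀ (a : List Int), Dom_solution_py a → Spec_solution_py a (solution_py a)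


-- ===== LEMMAS AND PROOFS =====

-- proof-side abbreviations: Python-odd test, odd count, index of the last odd element
def pvOdd (s : Int) : Bool := PySem.Int.mod s 2 == 1
def pvCnt (xs : List Int) : Nat := xs.countP pvOdd
def pvLast : List Int → Nat
  | [] => 0
  | _ :: rest => if 0 < pvCnt rest then pvLast rest + 1 else 0

lemma pvOdd_ne_zero (s : Int) : (PySem.Int.mod s 2 != 0) = pvOdd s := by
  unfold pvOdd
  rw [PySem.Int.mod_eq_emod_of_pos (by norm_num)]
  rcases Int.emod_two_eq s with h | h <;> simp [h]

lemma emod_of_pvOdd {s : Int} (h : pvOdd s = true) : s % 2 = 1 := by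
  unfold pvOdd at h
  rw [PySem.Int.mod_eq_emod_of_pos (by norm_num)] at h
  simpa using h

lemma emod_of_not_pvOdd {s : Int} (h : pvOdd s = false) : s % 2 = 0 := by
  unfold pvOdd at h
  rw [PySem.Int.mod_eq_emod_of_pos (by norm_num)] at h
  rcases Int.emod_two_eq s with h2 | h2
  · exact h2
  · rw [h2] at h; simp at h

lemma pvParity (xs : List Int) : xs.sum % 2 = ((pvCnt xs : Int)) % 2 := by
  induction xs with
  | nil => simp [pvCnt]
  | cons s rest ih =>
    simp only [List.sum_cons, pvCnt, List.countP_cons] at *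
    by_cases hs : pvOdd s
    · have := emod_of_pvOdd hs
      simp only [hs, if_pos] at *
      push_cast
      omega
    · have := emod_of_not_pvOdd (by simpa using hs)
      simp only [hs, if_neg, Bool.false_eq_true, not_false_iff] at *
      push_cast
      omega

lemma pvMod_sum (xs : List Int) :
    PySem.Int.mod xs.sum 2 = PySem.Int.mod ((pvCnt xs : Nat) : Int) 2 := by
  rw [PySem.Int.mod_eq_emod_of_pos (by norm_num), PySem.Int.mod_eq_emod_of_pos (by norm_num)]
  exact pvParity xs

lemma pvCnt_nil : pvCnt [] = 0 := rfl

lemma pvCnt_cons_odd {s : Int} (rest : List Int) (hs : pvOdd s = true) :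
    pvCnt (s :: rest) = pvCnt rest + 1 := by
  unfold pvCnt; rw [List.countP_cons]; simp [hs]

lemma pvCnt_cons_even {s : Int} (rest : List Int) (hs : pvOdd s = false) :
    pvCnt (s :: rest) = pvCnt rest := by
  unfold pvCnt; rw [List.countP_cons]; simp [hs]

lemma pvCnt_append (u v : List Int) : pvCnt (u ++ v) = pvCnt u + pvCnt v := by
  unfold pvCnt; exact List.countP_append

lemma aScan1 (xs : List Int) : ∀ lec rec : Int,
    aScan xs 1 lec rec true = ((pvCnt xs == 0) && (lec == rec + (xs.length : Int))) := by
  induction xs with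
  | nil => intro lec rec; simp [aScan, pvCnt_nil]
  | cons s rest ih =>
    intro lec rec
    rw [aScan]
    cases hs : pvOdd s with
    | true =>
      have hb : (PySem.Int.mod s 2 == 1) = true := hs
      simp only [hb, if_true, show ((1 : Int) + 1 == 2) = true by decide,
        pvCnt_cons_odd rest hs]
      simp
    | false =>
      have hb : (PySem.Int.mod s 2 == 1) = false := hs
      simp only [hb, Bool.false_eq_true, if_false, if_true,
        show ((1 : Int) == 2) = false by decide, ih, pvCnt_cons_even rest hs]
      rw [Bool.eq_iff_iff]
      simp only [Bool.and_eq_true, beq_iff_eq, List.length_cons]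
      push_cast
      omega

lemma aScan0 (xs : List Int) : ∀ lec : Int,
    aScan xs 0 lec 0 false
      = ((pvCnt xs == 1) && (lec + 2 * ((xs.findIdx pvOdd : Nat) : Int) == (xs.length : Int) - 1)) := by
  induction xs with
  | nil => intro lec; simp [aScan, pvCnt_nil]
  | cons s rest ih =>
    intro lec
    rw [aScan]
    cases hs : pvOdd s with
    | true =>
      have hb : (PySem.Int.mod s 2 == 1) = true := hs
      simp only [hb, if_true, show ((0 : Int) + 1 = 1) by norm_num]
      simp only [show ((1 : Int) == 2) = false by decide, Bool.false_eq_true, if_false,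
        aScan1, pvCnt_cons_odd rest hs, List.findIdx_cons, hs, cond_true]
      rw [Bool.eq_iff_iff]
      simp only [Bool.and_eq_true, beq_iff_eq, List.length_cons]
      push_cast
      omega
    | false =>
      have hb : (PySem.Int.mod s 2 == 1) = false := hs
      simp only [hb, Bool.false_eq_true, if_false,
        show ((0 : Int) == 2) = false by decide, ih, pvCnt_cons_even rest hs,
        List.findIdx_cons, hs, cond_false]
      rw [Bool.eq_iff_iff]
      simp only [Bool.and_eq_true, beq_iff_eq, List.length_cons]
      push_cast
      omega

lemma pvLast_append (u v : List Int) (hv : 0 < pvCnt v) :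
    pvLast (u ++ v) = u.length + pvLast v := by
  induction u with
  | nil => simp
  | cons x u ih =>
    have hc : 0 < pvCnt (u ++ v) := by
      unfold pvCnt at *; rw [List.countP_append]; omega
    simp only [List.cons_append, pvLast, hc, if_pos, ih, List.length_cons]
    omega

lemma pvLast_eq_findIdx (v : List Int) : pvCnt v = 1 → pvLast v = v.findIdx pvOdd := by
  induction v with
  | nil => intro h; simp [pvCnt] at h
  | cons s rest ih =>
    intro h
    cases hs : pvOdd s with
    | true =>
      have hr : pvCnt rest = 0 := by have := pvCnt_cons_odd rest hs; omega
      simp [pvLast, hr, List.findIdx_cons, hs]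
    | false =>
      have hr : pvCnt rest = 1 := by have := pvCnt_cons_even rest hs; omega
      simp [pvLast, hr, List.findIdx_cons, hs, ih hr]

lemma bStats_total (xs : List Int) : ∀ (k : Nat) (t f l0 : Int),
    (bStats xs k (t, f, l0)).1 = t + pvCnt xs := by
  induction xs with
  | nil => intro k t f l0; simp [bStats, pvCnt]
  | cons s rest ih =>
    intro k t f l0
    rw [bStats, pvOdd_ne_zero]
    by_cases hs : pvOdd s <;>
      simp only [hs, if_true, if_false, Bool.false_eq_true, ih, pvCnt, List.countP_cons] <;>
      push_cast <;> ring_nf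

lemma bStats_fo_stay (xs : List Int) : ∀ (k : Nat) (t f l0 : Int), 0 ≤ f →
    (bStats xs k (t, f, l0)).2.1 = f := by
  induction xs with
  | nil => intro k t f l0 _; simp [bStats]
  | cons s rest ih =>
    intro k t f l0 hf
    rw [bStats, pvOdd_ne_zero]
    by_cases hs : pvOdd s
    · simp only [hs, if_true]
      rw [if_neg (by omega)]
      exact ih _ _ _ _ hf
    · simp only [hs, Bool.false_eq_true, if_false]
      exact ih _ _ _ _ hf

lemma bStats_fo (xs : List Int) : ∀ (k : Nat) (t l0 : Int),
    (bStats xs k (t, -1, l0)).2.1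
      = if 0 < pvCnt xs then (((k + xs.findIdx pvOdd : Nat)) : Int) else -1 := by
  induction xs with
  | nil => intro k t l0; simp [bStats, pvCnt]
  | cons s rest ih =>
    intro k t l0
    rw [bStats, pvOdd_ne_zero]
    by_cases hs : pvOdd s
    · have hc : 0 < pvCnt (s :: rest) := by
        unfold pvCnt; rw [List.countP_cons]; simp [hs]
      simp only [hs, if_true]
      rw [if_pos (by decide)]
      rw [bStats_fo_stay rest (k + 1) _ _ _ (by positivity)]
      simp [hc, List.findIdx_cons, hs]
    · simp only [hs, Bool.false_eq_true, if_false, ih]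
      have hc : pvCnt (s :: rest) = pvCnt rest := by
        unfold pvCnt; rw [List.countP_cons]; simp [hs]
      by_cases hr : 0 < pvCnt rest
      · rw [if_pos hr, if_pos (by omega)]
        simp [List.findIdx_cons, hs]
        omega
      · rw [if_neg hr, if_neg (by omega)]

lemma bStats_lo (xs : List Int) : ∀ (k : Nat) (t f l0 : Int),
    (bStats xs k (t, f, l0)).2.2
      = if 0 < pvCnt xs then (((k + pvLast xs : Nat)) : Int) else l0 := by
  induction xs with
  | nil => intro k t f l0; simp [bStats, pvCnt]
  | cons s rest ih =>
    intro k t f l0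
    rw [bStats, pvOdd_ne_zero]
    by_cases hs : pvOdd s
    · have hc : 0 < pvCnt (s :: rest) := by
        unfold pvCnt; rw [List.countP_cons]; simp [hs]
      simp only [hs, if_true, ih]
      rw [if_pos hc]
      by_cases hr : 0 < pvCnt rest
      · rw [if_pos hr]
        simp only [pvLast, hr, if_pos]
        push_cast; omega
      · rw [if_neg hr]
        simp only [pvLast, hr]
        push_cast; omega
    · have hc : pvCnt (s :: rest) = pvCnt rest := by
        unfold pvCnt; rw [List.countP_cons]; simp [hs]
      simp only [hs, Bool.false_eq_true, if_false, ih]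
      by_cases hr : 0 < pvCnt rest
      · rw [if_pos hr, if_pos (by omega)]
        simp only [pvLast, hr, if_pos]
        push_cast; omega
      · rw [if_neg hr, if_neg (by omega)]

lemma cnt_take_succ (xs : List Int) (n : Nat) (h : n < xs.length) :
    pvCnt (xs.take (n + 1)) = pvCnt (xs.take n) + (if pvOdd xs[n] then 1 else 0) := by
  unfold pvCnt
  rw [List.take_add_one, List.countP_append]
  simp [List.getElem?_eq_getElem h, List.countP_cons]

lemma loopI_eq (a : List Int) (fo lo : Int)
    (hfo : 0 < pvCnt a → fo = ((a.findIdx pvOdd : Nat) : Int))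
    (hlo : 0 < pvCnt a → lo = ((pvLast a : Nat) : Int))
    (j : Nat) (hj : j < a.length) :
    ∀ n i, n = a.length - j + 1 - i → 1 ≤ i →
    aLoopI a j i
      = bLoopI a ((pvCnt a : Nat) : Int) fo lo ((pvCnt (a.take j) : Nat) : Int) j i
          ((pvCnt ((a.drop j).take (i - 1)) : Nat) : Int) := by
  intro n
  induction n with
  | zero =>
    intro i hn hi
    rw [aLoopI, bLoopI, dif_neg (by omega), dif_neg (by omega)]
  | succ n ih =>
    intro i hn hi
    rw [aLoopI, bLoopI]
    by_cases hg : i ≤ a.length - j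
    case neg => rw [dif_neg hg, dif_neg hg]
    rw [dif_pos hg, dif_pos hg]
    have hji : j + i ≤ a.length := by omega
    have hidx : j + i - 1 < a.length := by omega
    have hd1 : i - 1 < (a.drop j).length := by rw [List.length_drop]; omega
    -- the incremented so equals the odd count of the length-i slice
    have hget : a.getD (j + i - 1) 0 = (a.drop j)[i - 1] := by
      rw [List.getD_eq_getElem a 0 hidx, List.getElem_drop]
      congr 1
      omega
    have hstep : pvCnt ((a.drop j).take i)
        = pvCnt ((a.drop j).take (i - 1)) + (if pvOdd ((a.drop j)[i - 1]) then 1 else 0) := by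
      have h2 := cnt_take_succ (a.drop j) (i - 1) hd1
      rw [show i - 1 + 1 = i by omega] at h2
      exact h2
    have hso : (if (PySem.Int.mod (a.getD (j + i - 1) 0) 2 != 0)
          then ((pvCnt ((a.drop j).take (i - 1)) : Nat) : Int) + 1
          else ((pvCnt ((a.drop j).take (i - 1)) : Nat) : Int))
        = ((pvCnt ((a.drop j).take i) : Nat) : Int) := by
      rw [pvOdd_ne_zero, hget, hstep]
      cases h : pvOdd ((a.drop j)[i - 1]) <;> simp
    simp only [hso]
    -- condition 1: slice sum parity = so parity
    rw [pvMod_sum ((a.drop j).take i)]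
    cases hc1 : (PySem.Int.mod ((pvCnt ((a.drop j).take i) : Nat) : Int) 2 == 1) with
    | true =>
      rw [if_pos rfl, if_pos rfl]
      have := ih (i + 1) (by omega) (by omega)
      rw [show i + 1 - 1 = i by omega] at this
      exact this
    | false =>
      rw [if_neg Bool.false_ne_true, if_neg Bool.false_ne_true]
      -- facts about left = a.take j ++ a.drop (j+i)
      have hLlen : (a.take j ++ a.drop (j + i)).length = a.length - i := by
        rw [List.length_append, List.length_take, List.length_drop]
        omega
      have hCsplit : pvCnt a
          = pvCnt (a.take j) + pvCnt ((a.drop j).take i) + pvCnt (a.drop (j + i)) := by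
        conv_lhs => rw [← List.take_append_drop j a]
        rw [pvCnt_append]
        conv_lhs => rw [← List.take_append_drop i (a.drop j)]
        rw [pvCnt_append, List.drop_drop]
        omega
      have hCL : pvCnt (a.take j ++ a.drop (j + i))
          = pvCnt (a.take j) + pvCnt (a.drop (j + i)) := pvCnt_append _ _
      have hlodd : ((pvCnt a : Nat) : Int) - ((pvCnt ((a.drop j).take i) : Nat) : Int)
          = ((pvCnt (a.take j ++ a.drop (j + i)) : Nat) : Int) := by
        rw [hCL]; push_cast; omega
      -- condition 2
      have hne : (!(a.take j ++ a.drop (j + i)).isEmpty)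
          = (decide (0 < (a.length : Int) - (i : Int))) := by
        rw [Bool.eq_iff_iff]
        simp only [Bool.not_eq_true', List.isEmpty_eq_false_iff, ← List.length_pos_iff, hLlen,
          decide_eq_true_eq]
        omega
      have hc2eq : (!(a.take j ++ a.drop (j + i)).isEmpty
            && (PySem.Int.mod ((a.take j ++ a.drop (j + i)).sum) 2 == 0))
          = ((decide (0 < (a.length : Int) - (i : Int)))
            && (PySem.Int.mod (((pvCnt a : Nat) : Int) - ((pvCnt ((a.drop j).take i) : Nat) : Int)) 2 == 0)) := by
        rw [pvMod_sum, hlodd, hne]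
      rw [hc2eq]
      cases hc2 : ((decide (0 < (a.length : Int) - (i : Int)))
            && (PySem.Int.mod (((pvCnt a : Nat) : Int) - ((pvCnt ((a.drop j).take i) : Nat) : Int)) 2 == 0)) with
      | true =>
        rw [if_pos rfl, if_pos rfl]
        have := ih (i + 1) (by omega) (by omega)
        rw [show i + 1 - 1 = i by omega] at this
        exact this
      | false =>
        rw [if_neg Bool.false_ne_true, if_neg Bool.false_ne_true]
        -- empty / length-1 / length-2 branches
        have hbe : (a.take j ++ a.drop (j + i)).isEmpty
            = (((a.length : Int) - (i : Int)) == 0) := by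
          rw [Bool.eq_iff_iff]
          simp only [List.isEmpty_iff, ← List.length_eq_zero_iff, hLlen, beq_iff_eq]
          omega
        have hb1 : ((a.take j ++ a.drop (j + i)).length == 1)
            = (((a.length : Int) - (i : Int)) == 1) := by
          rw [Bool.eq_iff_iff]
          simp only [hLlen, beq_iff_eq]
          omega
        have hb2 : ((a.take j ++ a.drop (j + i)).length == 2)
            = (((a.length : Int) - (i : Int)) == 2) := by
          rw [Bool.eq_iff_iff]
          simp only [hLlen, beq_iff_eq]
          omega
        rw [hbe, hb1, hb2]
        cases hce : (((a.length : Int) - (i : Int)) == 0) with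
        | true => rw [if_pos rfl, if_pos rfl]
        | false =>
        rw [if_neg Bool.false_ne_true, if_neg Bool.false_ne_true]
        cases hc3 : (((a.length : Int) - (i : Int)) == 1) with
        | true => rw [if_pos rfl, if_pos rfl]
        | false =>
        rw [if_neg Bool.false_ne_true, if_neg Bool.false_ne_true]
        cases hc4 : (((a.length : Int) - (i : Int)) == 2) with
        | true =>
          rw [if_pos rfl, if_pos rfl]
          have := ih (i + 1) (by omega) (by omega)
          rw [show i + 1 - 1 = i by omega] at this
          exact this
        | false =>
        rw [if_neg Bool.false_ne_true, if_neg Bool.false_ne_true]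
        -- the scan branch
        have hR := ih (i + 1) (by omega) (by omega)
        rw [show i + 1 - 1 = i by omega] at hR
        rw [aScan0]
        by_cases hC : pvCnt (a.take j ++ a.drop (j + i)) = 1
        · -- exactly one odd element outside the slice
          have hlo1 : (((pvCnt a : Nat) : Int) - ((pvCnt ((a.drop j).take i) : Nat) : Int) == 1) = true := by
            rw [hlodd, hC]; simp
          rw [if_pos hlo1]
          -- p equals the index of the unique odd element of left
          have hjle : j ≤ a.length := by omega
          have hltj : (a.take j).length = j := by rw [List.length_take]; omega
          have hp : (if ((pvCnt (a.take j) : Nat) : Int) == 1 then fo else lo - (i : Int))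
              = (((a.take j ++ a.drop (j + i)).findIdx pvOdd : Nat) : Int) := by
            by_cases hoj : pvCnt (a.take j) = 1
            · rw [if_pos (by rw [hoj]; simp)]
              have hfi : (a.take j).findIdx pvOdd < j := by
                have h := (List.findIdx_lt_length (p := pvOdd) (xs := a.take j)).mpr (by
                  rcases List.countP_pos_iff.mp (show 0 < List.countP pvOdd (a.take j) by
                    have : pvCnt (a.take j) = 1 := hoj; unfold pvCnt at this; omega) with ⟨x, hx, hpx⟩
                  exact ⟨x, hx, hpx⟩)
                rwa [hltj] at h
              have hfa : a.findIdx pvOdd = (a.take j).findIdx pvOdd := by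
                conv_lhs => rw [← List.take_append_drop j a]
                rw [List.findIdx_append, if_pos (by rw [hltj]; exact hfi)]
              have hfL : (a.take j ++ a.drop (j + i)).findIdx pvOdd = (a.take j).findIdx pvOdd := by
                rw [List.findIdx_append, if_pos (by rw [hltj]; exact hfi)]
              rw [hfo (by omega), hfa, hfL]
            · have hoj0 : pvCnt (a.take j) = 0 := by rw [hCL] at hC; omega
              have hsuf : pvCnt (a.drop (j + i)) = 1 := by rw [hCL] at hC; omega
              rw [if_neg (by rw [hoj0]; simp)]
              have hfj : (a.take j).findIdx pvOdd = j := by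
                have h := (List.findIdx_eq_length (p := pvOdd) (xs := a.take j)).mpr (by
                  intro x hx
                  by_contra hpx
                  have : 0 < List.countP pvOdd (a.take j) :=
                    List.countP_pos_iff.mpr ⟨x, hx, by simpa using hpx⟩
                  unfold pvCnt at hoj0; omega)
                rwa [hltj] at h
              have hfL : (a.take j ++ a.drop (j + i)).findIdx pvOdd
                  = (a.drop (j + i)).findIdx pvOdd + j := by
                rw [List.findIdx_append, if_neg (by rw [hfj, hltj]; omega), hltj]
              have hlast : pvLast a = j + i + (a.drop (j + i)).findIdx pvOdd := by
                conv_lhs => rw [← List.take_append_drop (j + i) a]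
                rw [pvLast_append _ _ (by omega), List.length_take,
                  pvLast_eq_findIdx _ hsuf]
                omega
              rw [hlo (by omega), hlast, hfL]
              push_cast
              omega
          rw [hp]
          have hsc : ((0 : Int) + 2 * (((a.take j ++ a.drop (j + i)).findIdx pvOdd : Nat) : Int)
                == ((a.take j ++ a.drop (j + i)).length : Int) - 1)
              = (2 * (((a.take j ++ a.drop (j + i)).findIdx pvOdd : Nat) : Int)
                == (a.length : Int) - (i : Int) - 1) := by
            rw [Bool.eq_iff_iff]
            simp only [beq_iff_eq, hLlen]
            omega
          rw [show (pvCnt (a.take j ++ a.drop (j + i)) == 1) = true by rw [hC]; simp]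
          rw [Bool.true_and, hsc]
          cases hfin : (2 * (((a.take j ++ a.drop (j + i)).findIdx pvOdd : Nat) : Int)
                == (a.length : Int) - (i : Int) - 1) with
          | true => rw [if_pos rfl, if_pos rfl]
          | false => rw [if_neg Bool.false_ne_true, if_neg Bool.false_ne_true]; exact hR
        · rw [show (pvCnt (a.take j ++ a.drop (j + i)) == 1) = false by
              simpa using hC]
          rw [Bool.false_and, if_neg (by simp)]
          rw [if_neg (by rw [hlodd]; simpa using hC)]
          exact hR

lemma loopJ_eq (a : List Int) (fo lo : Int)
    (hfo : 0 < pvCnt a → fo = ((a.findIdx pvOdd : Nat) : Int))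
    (hlo : 0 < pvCnt a → lo = ((pvLast a : Nat) : Int)) :
    ∀ m j, m = a.length - j →
    aLoopJ a j = bLoopJ a ((pvCnt a : Nat) : Int) fo lo j ((pvCnt (a.take j) : Nat) : Int) := by
  intro m
  induction m with
  | zero =>
    intro j hm
    rw [aLoopJ, bLoopJ, dif_neg (by omega), dif_neg (by omega)]
  | succ m ih =>
    intro j hm
    rw [aLoopJ, bLoopJ]
    by_cases hj : j < a.length
    case neg => rw [dif_neg hj, dif_neg hj]
    rw [dif_pos hj, dif_pos hj]
    have h1 := loopI_eq a fo lo hfo hlo j hj (a.length - j) 1 (by omega) (by omega)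
    rw [show (1 : Nat) - 1 = 0 by omega, List.take_zero, pvCnt_nil, Nat.cast_zero] at h1
    rw [h1]
    cases hres : bLoopI a ((pvCnt a : Nat) : Int) fo lo ((pvCnt (a.take j) : Nat) : Int) j 1 0 with
    | some r => rfl
    | none =>
      simp only
      have hupd : (if (PySem.Int.mod (a.getD j 0) 2 != 0)
            then ((pvCnt (a.take j) : Nat) : Int) + 1
            else ((pvCnt (a.take j) : Nat) : Int))
          = ((pvCnt (a.take (j + 1)) : Nat) : Int) := by
        rw [pvOdd_ne_zero, List.getD_eq_getElem a 0 hj, cnt_take_succ a j hj]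
        cases h : pvOdd a[j] <;> simp
      rw [hupd]
      exact ih (j + 1) (by omega)

-- ===== VERDICT (by name: the statement is the Claim_ definition above) =====
theorem solution_py_spec : Claim_equal_solution_py := by
  unfold Claim_equal_solution_py
  intro a _
  unfold Spec_solution_py solution_py solution_py_alt
  rcases hb : bStats a 0 (0, -1, -1) with ⟨t, f, l0⟩
  have ht := bStats_total a 0 0 (-1) (-1)
  have hf := bStats_fo a 0 0 (-1)
  have hl := bStats_lo a 0 0 (-1) (-1)
  rw [hb] at ht hf hl
  simp only at ht hf hl
  have ht' : t = ((pvCnt a : Nat) : Int) := by omega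
  have hfo : 0 < pvCnt a → f = ((a.findIdx pvOdd : Nat) : Int) := by
    intro h; rw [hf, if_pos h]; norm_num
  have hlo : 0 < pvCnt a → l0 = ((pvLast a : Nat) : Int) := by
    intro h; rw [hl, if_pos h]; norm_num
  have := loopJ_eq a f l0 hfo hlo (a.length) 0 (by omega)
  simp only [List.take_zero] at this
  rw [ht']
  exact this
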